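-- pv_equiv track=rewrite | github.com/douzujun/Python-Foundation-Suda | 苏大上机代码/python_project/03_历年真题期末期中/RealExercise/py23_midterm2017.py | findMultiAlphaWords
-- ===== SOURCE A (Python) =====
-- def findMultiAlphaWords(wordlst, num):
--     wordResultLst = []
--     for word in wordlst:
--         w = list(word.lower())
--         for e in w:
--             if w.count(e) >= num:
--                 wordResultLst.append(word)
--                 break
--     return wordResultLst
-- ===== SOURCE B (Python) =====
-- def findMultiAlphaWords(wordlst, num):
--     result = []
--     for word in wordlst:
--         s = sorted(word.lower())
--         prev = None
--         run = 0
--         for c in s: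
--             if c == prev:
--                 run += 1
--             else:
--                 prev, run = c, 1
--             if run >= num:
--                 result.append(word)
--                 break
--     return result
-- ===== Notes on version B (the rewrite author's own statement) =====
-- stated objective: alternative
-- what changed: Instead of rescanning the word with w.count for each character, B sorts the lowercased letters and makes one linear scan over the sorted letters tracking the length of the current run of equal letters, appending the word as soon as a run reaches num.
import Mathlib
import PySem

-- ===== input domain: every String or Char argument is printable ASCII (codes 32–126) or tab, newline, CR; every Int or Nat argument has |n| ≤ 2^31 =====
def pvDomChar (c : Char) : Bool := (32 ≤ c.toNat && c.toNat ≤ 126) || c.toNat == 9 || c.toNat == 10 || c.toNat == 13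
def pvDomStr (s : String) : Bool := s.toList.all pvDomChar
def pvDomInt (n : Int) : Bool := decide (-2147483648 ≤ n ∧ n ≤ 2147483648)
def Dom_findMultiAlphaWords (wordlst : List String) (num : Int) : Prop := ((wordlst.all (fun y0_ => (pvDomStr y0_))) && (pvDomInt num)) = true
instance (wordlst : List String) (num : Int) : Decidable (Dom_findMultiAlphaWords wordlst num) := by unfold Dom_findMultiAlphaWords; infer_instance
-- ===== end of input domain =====

-- B sorts each word's lowercased letters and scans once for a run of length ≥ num
-- instead of rescanning the word with count per character (alternative algorithm).


-- ===== PORT A =====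
-- inner 'for e in w: if w.count(e) >= num: … break' loop, carrying the full list for count
def pvInnerA (full : List Char) (num : Int) : List Char → Bool
  | [] => false
  | e :: rest => if num ≤ (full.count e : Int) then true else pvInnerA full num rest

def findMultiAlphaWords (wordlst : List String) (num : Int) : List String :=
  wordlst.foldl (fun acc word =>
    let w := (PySem.Str.lower word).toList
    if pvInnerA w num w then acc ++ [word] else acc) []

-- ===== PORT B =====
-- inner 'for c in s: …' loop of Source B, state (prev, run); returns true when a run reaches num
def pvScanB (num : Int) : List Char → Option Char → Int → Bool
  | [], _, _ => false
  | c :: rest, prev, run =>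
    let run' := if prev = some c then run + 1 else 1
    if num ≤ run' then true else pvScanB num rest (some c) run'

def findMultiAlphaWords_alt (wordlst : List String) (num : Int) : List String :=
  wordlst.foldl (fun acc word =>
    let s := PySem.List.sorted ((PySem.Str.lower word).toList) (fun x => x) false
    if pvScanB num s none 0 then acc ++ [word] else acc) []

-- ===== PRECONDITION & SPEC =====
def Spec_findMultiAlphaWords (wordlst : List String) (num : Int) (out : List String) : Prop := out = findMultiAlphaWords_alt wordlst num
instance (wordlst : List String) (num : Int) (out : List String) : Decidable (Spec_findMultiAlphaWords wordlst num out) := by unfold Spec_findMultiAlphaWords; infer_instance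

-- ===== CLAIM =====
def Claim_equal_findMultiAlphaWords : Prop := ∀ (wordlst : List String) (num : Int), Dom_findMultiAlphaWords wordlst num → Spec_findMultiAlphaWords wordlst num (findMultiAlphaWords wordlst num)

-- ===== LEMMAS AND PROOFS =====
theorem pvInnerA_eq_any (full : List Char) (num : Int) (l : List Char) :
    pvInnerA full num l = l.any (fun e => decide (num ≤ (full.count e : Int))) := by
  induction l with
  | nil => rfl
  | cons e rest ih => by_cases h : num ≤ (full.count e : Int) <;> simp [pvInnerA, ih, h]

theorem count_cons_int (c e : Char) (rest : List Char) :
    ((c :: rest).count e : Int) = (rest.count e : Int) + (if e = c then 1 else 0) := by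
  by_cases h : e = c
  · simp [h]
  · simp [h, Ne.symm h]

-- the invariant of B's run scan on a sorted tail
theorem pvScanB_inv (num : Int) (s : List Char) (p : Char) (r : Int)
    (hs : s.Pairwise (· ≤ ·)) (hp : ∀ c ∈ s, p ≤ c) (hr : r < num) :
    pvScanB num s (some p) r = true ↔
      (num ≤ r + (s.count p : Int) ∨ ∃ e ∈ s, e ≠ p ∧ num ≤ (s.count e : Int)) := by
  induction s generalizing p r with
  | nil =>
    simp only [pvScanB, List.count_nil, List.not_mem_nil]
    constructor
    · intro h; exact absurd h (by simp)
    · rintro (h | ⟨e, he, _⟩)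
      · exfalso; push_cast at h; omega
      · exact absurd he (by simp)
  | cons c rest ih =>
    have hsr : rest.Pairwise (· ≤ ·) := hs.tail
    have hce : ∀ e ∈ rest, c ≤ e := fun e he => (List.pairwise_cons.mp hs).1 e he
    by_cases hc : p = c
    · subst hc
      show (if num ≤ (if (some p : Option Char) = some p then r + 1 else 1) then true
            else pvScanB num rest (some p) (if (some p : Option Char) = some p then r + 1 else 1)) = true ↔ _
      rw [if_pos rfl]
      have hcnt : ((p :: rest).count p : Int) = (rest.count p : Int) + 1 := by
        rw [count_cons_int]; simp
      by_cases h1 : num ≤ r + 1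
      · rw [if_pos h1]
        simp only [true_iff]
        left; rw [hcnt]; omega
      · rw [if_neg h1, ih p (r + 1) hsr hce (by omega)]
        constructor
        · rintro (h | ⟨e, he, hne, hcnte⟩)
          · left; rw [hcnt]; omega
          · refine Or.inr ⟨e, List.mem_cons_of_mem _ he, hne, ?_⟩
            rw [count_cons_int, if_neg hne]; omega
        · rintro (h | ⟨e, he, hne, hcnte⟩)
          · left; rw [hcnt] at h; omega
          · rcases List.mem_cons.mp he with he | he
            · exact absurd he hne
            · refine Or.inr ⟨e, he, hne, ?_⟩
              rw [count_cons_int, if_neg hne] at hcnte; omega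
    · have hpc : p < c := lt_of_le_of_ne (hp c List.mem_cons_self) hc
      have hpnot : ∀ e ∈ c :: rest, e ≠ p := by
        intro e he h
        subst h
        rcases List.mem_cons.mp he with h' | h'
        · exact hc h'
        · exact absurd (hce _ h') (not_le.mpr hpc)
      have hcount0 : ((c :: rest).count p : Int) = 0 := by
        rw [List.count_eq_zero.mpr (fun hmem => (hpnot p hmem) rfl)]; rfl
      have hne' : ¬((some p : Option Char) = some c) := fun h => hc (Option.some.inj h)
      show (if num ≤ (if (some p : Option Char) = some c then r + 1 else 1) then true
            else pvScanB num rest (some c) (if (some p : Option Char) = some c then r + 1 else 1)) = true ↔ _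
      rw [if_neg hne']
      have hcntc : ((c :: rest).count c : Int) = (rest.count c : Int) + 1 := by
        rw [count_cons_int]; simp
      by_cases h1 : num ≤ 1
      · rw [if_pos h1]
        simp only [true_iff]
        refine Or.inr ⟨c, List.mem_cons_self, fun h => hc h.symm, ?_⟩
        rw [hcntc]; have : (0:Int) ≤ (rest.count c : Int) := by positivity
        omega
      · rw [if_neg h1, ih c 1 hsr hce (by omega)]
        constructor
        · rintro (h | ⟨e, he, hne, hcnte⟩)
          · refine Or.inr ⟨c, List.mem_cons_self, fun h' => hc h'.symm, ?_⟩
            rw [hcntc]; omega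
          · refine Or.inr ⟨e, List.mem_cons_of_mem _ he,
              hpnot e (List.mem_cons_of_mem _ he), ?_⟩
            rw [count_cons_int, if_neg (fun h => hne h)]; omega
        · rintro (h | ⟨e, he, hne, hcnte⟩)
          · rw [hcount0] at h; omega
          · rcases List.mem_cons.mp he with he | he
            · subst he; left; rw [hcntc] at hcnte; omega
            · by_cases hec : e = c
              · subst hec; left; rw [hcntc] at hcnte; omega
              · refine Or.inr ⟨e, he, hec, ?_⟩
                rw [count_cons_int, if_neg hec] at hcnte; omega

-- B's sorted run scan decides "some letter occurs ≥ num times"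
theorem pvScanB_sorted (num : Int) (s : List Char) (hs : s.Pairwise (· ≤ ·)) :
    pvScanB num s none 0 = s.any (fun e => decide (num ≤ (s.count e : Int))) := by
  cases s with
  | nil => rfl
  | cons c rest =>
    have hnone : ¬((none : Option Char) = some c) := by simp
    have hcntc : ((c :: rest).count c : Int) = (rest.count c : Int) + 1 := by
      rw [count_cons_int]; simp
    have hcnonneg : (0:Int) ≤ (rest.count c : Int) := by positivity
    show (if num ≤ (if (none : Option Char) = some c then 0 + 1 else 1) then true
          else pvScanB num rest (some c) (if (none : Option Char) = some c then 0 + 1 else 1))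
        = (c :: rest).any (fun e => decide (num ≤ ((c :: rest).count e : Int)))
    rw [if_neg hnone]
    by_cases h1 : num ≤ 1
    · rw [if_pos h1]
      symm; rw [List.any_eq_true]
      exact ⟨c, List.mem_cons_self, by rw [decide_eq_true_eq, hcntc]; omega⟩
    · rw [if_neg h1, Bool.eq_iff_iff,
        pvScanB_inv num rest c 1 hs.tail (fun e he => (List.pairwise_cons.mp hs).1 e he) (by omega),
        List.any_eq_true]
      constructor
      · rintro (h | ⟨e, he, hne, hcnte⟩)
        · exact ⟨c, List.mem_cons_self, by rw [decide_eq_true_eq, hcntc]; omega⟩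
        · refine ⟨e, List.mem_cons_of_mem _ he, ?_⟩
          rw [decide_eq_true_eq, count_cons_int, if_neg hne]; omega
      · rintro ⟨e, he, hcnte⟩
        rw [decide_eq_true_eq] at hcnte
        by_cases hec : e = c
        · subst hec; left; rw [hcntc] at hcnte; omega
        · rcases List.mem_cons.mp he with he | he
          · exact absurd he hec
          · refine Or.inr ⟨e, he, hec, ?_⟩
            rw [count_cons_int, if_neg hec] at hcnte; omega

-- the per-word conditions of A and B agree
theorem pvCond_eq (w : List Char) (num : Int) :
    pvInnerA w num w = pvScanB num (PySem.List.sorted w (fun x => x) false) none 0 := by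
  set s := PySem.List.sorted w (fun x => x) false with hsdef
  have hperm : s.Perm w := PySem.List.sorted_perm w (fun x => x) false
  have hpair : s.Pairwise (· ≤ ·) := PySem.List.sorted_pairwise w (fun x => x)
  rw [pvScanB_sorted num s hpair, pvInnerA_eq_any, Bool.eq_iff_iff]
  simp only [List.any_eq_true, decide_eq_true_eq]
  constructor
  · rintro ⟨e, he, h⟩
    exact ⟨e, hperm.mem_iff.mpr he, by rwa [hperm.count_eq]⟩
  · rintro ⟨e, he, h⟩
    exact ⟨e, hperm.mem_iff.mp he, by rwa [hperm.count_eq] at h⟩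

-- ===== VERDICT =====
theorem findMultiAlphaWords_spec : Claim_equal_findMultiAlphaWords := by
  intro wordlst num _
  unfold Spec_findMultiAlphaWords findMultiAlphaWords findMultiAlphaWords_alt
  simp only [pvCond_eq]
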